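-- pv_equiv track=rewrite | github.com/Madung2/table_type_detect | tsexpert_neo/services/table_detection.py | scattered_bg_found
-- ===== SOURCE A (Python) =====
-- def scattered_bg_found(row):
--     """check if first bg cell and first none bg cell and second bg cell is found and return in boolean
--     Args:
--         row (list):[{"txt":"차주(시행사)","bg": "dbe5f1"},{"txt":"샘플㈜ (그룹단일 : BB-, 특수금융 : A-)", "bg": false}]
--     """
--     bg_found = False
--     none_bg_found = False
--     for cell in row:
--         cell_is_bg = cell.get("bg", False)
--         if not bg_found and cell_is_bg: # first bg_cell found
--             bg_found = True
--         if not none_bg_found and not cell_is_bg: #first none_bg_cell found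
--             none_bg_found = True
--         if bg_found and none_bg_found and cell_is_bg: # second bg_cell found
--             return True
--     return False
-- ===== SOURCE B (Python) =====
-- def scattered_bg_found(row):
--     pivot = next((i for i, cell in enumerate(row) if not cell.get("bg", False)), None)
--     if pivot is None:
--         return False
--     return any(cell.get("bg", False) for cell in row[pivot + 1:])
-- ===== Notes on version B (the rewrite author's own statement) =====
-- stated objective: simpler
-- what changed: Replaced the two-flag state machine with a find-split-then-scan-tail decomposition: locate the first non-bg cell, then return whether any later cell is bg.
import Mathlib
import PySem

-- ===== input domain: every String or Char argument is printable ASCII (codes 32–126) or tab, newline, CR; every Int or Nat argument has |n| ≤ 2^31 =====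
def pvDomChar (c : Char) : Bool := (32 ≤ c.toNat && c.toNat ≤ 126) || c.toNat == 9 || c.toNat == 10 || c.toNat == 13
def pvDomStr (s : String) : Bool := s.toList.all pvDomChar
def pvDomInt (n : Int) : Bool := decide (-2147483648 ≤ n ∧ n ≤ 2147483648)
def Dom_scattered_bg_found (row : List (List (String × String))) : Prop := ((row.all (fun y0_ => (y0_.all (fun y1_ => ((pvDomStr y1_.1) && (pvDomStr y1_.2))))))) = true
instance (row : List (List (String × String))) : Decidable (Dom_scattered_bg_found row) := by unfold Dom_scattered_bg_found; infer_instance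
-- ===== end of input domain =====

-- B replaces A's two-flag state machine with a find-the-first-non-bg-cell split
-- followed by a scan of the tail for a bg cell (objective: simpler).

-- truthiness of cell.get("bg", False): missing key or empty string is falsy
def pvBg (cell : List (String × String)) : Bool :=
  match (PySem.Dict.mk cell).get? "bg" with
  | some s => !(s == "")
  | none => false

-- ===== PORT A =====
def scattered_bg_found_go (row : List (List (String × String)))
    (bg_found none_bg_found : Bool) : Bool :=
  match row with
  | [] => false
  | cell :: rest =>
    let cell_is_bg := pvBg cell
    let bg_found' := if !bg_found && cell_is_bg then true else bg_found
    let none_bg_found' := if !none_bg_found && !cell_is_bg then true else none_bg_found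
    if bg_found' && none_bg_found' && cell_is_bg then true
    else scattered_bg_found_go rest bg_found' none_bg_found'

def scattered_bg_found (row : List (List (String × String))) : Bool :=
  scattered_bg_found_go row false false

-- ===== PORT B =====
def scattered_bg_found_alt (row : List (List (String × String))) : Bool :=
  match row.findIdx? (fun cell => !pvBg cell) with
  | none => false
  | some pivot => (row.drop (pivot + 1)).any pvBg

-- ===== PRECONDITION & SPEC =====
def Spec_scattered_bg_found (row : List (List (String × String))) (out : Bool) : Prop := out = scattered_bg_found_alt row
instance (row : List (List (String × String))) (out : Bool) : Decidable (Spec_scattered_bg_found row out) := by unfold Spec_scattered_bg_found; infer_instance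

-- ===== CLAIM (what is proved, stated in full; the proofs are below) =====
def Claim_equal_scattered_bg_found : Prop := ∀ (row : List (List (String × String))), Dom_scattered_bg_found row → Spec_scattered_bg_found row (scattered_bg_found row)

-- ===== LEMMAS AND PROOFS =====

-- once a non-bg cell has been seen, A's loop is just "any later cell is bg"
theorem go_nbg_true (row : List (List (String × String))) (bg : Bool) :
    scattered_bg_found_go row bg true = row.any pvBg := by
  induction row generalizing bg with
  | nil => simp [scattered_bg_found_go]
  | cons cell rest ih =>
    simp only [scattered_bg_found_go, List.any_cons]
    cases h : pvBg cell <;> simp [ih]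

-- before any non-bg cell has been seen, bg_found is irrelevant and B's split applies
theorem go_nbg_false (row : List (List (String × String))) (bg : Bool) :
    scattered_bg_found_go row bg false = scattered_bg_found_alt row := by
  induction row generalizing bg with
  | nil => simp [scattered_bg_found_go, scattered_bg_found_alt]
  | cons cell rest ih =>
    simp only [scattered_bg_found_go, scattered_bg_found_alt, List.findIdx?_cons]
    cases h : pvBg cell with
    | false => simp [go_nbg_true]
    | true =>
      cases hf : rest.findIdx? (fun c => !pvBg c) <;> cases bg <;>
        simp [hf, ih (bg := true), scattered_bg_found_alt]

-- ===== VERDICT (by name: the statement is the Claim_ definition above) =====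
theorem scattered_bg_found_spec : Claim_equal_scattered_bg_found := by
  intro row _
  unfold Spec_scattered_bg_found scattered_bg_found
  exact go_nbg_false row false
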